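-- pv_equiv track=rewrite | github.com/GuglielmoCerri/Advent-of-Code | 2024/src/08.py | get_anti_nodes_p2
-- ===== SOURCE A (Python) =====
-- def in_grid(point, width, height):
--     x, y = point
--     return 0 <= x < width and 0 <= y < height
--
-- def get_anti_nodes_p2(antennas, antenna, width, height):
--     anti_nodes = set()
--     antenna_locations = antennas[antenna]
--
--     for i in range(len(antenna_locations) - 1):
--         for j in range(i + 1, len(antenna_locations)):
--             x1, y1 = antenna_locations[i]
--             x2, y2 = antenna_locations[j]
--             dx, dy = x2 - x1, y2 - y1
--             ax, ay = x1, y1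
--             while in_grid((ax, ay), width, height):
--                 anti_nodes.add((ax, ay))
--                 ax += dx
--                 ay += dy
--             ax, ay = x1 - dx, y1 - dy
--             while in_grid((ax, ay), width, height):
--                 anti_nodes.add((ax, ay))
--                 ax -= dx
--                 ay -= dy
--     return anti_nodes
-- ===== SOURCE B (Python) =====
-- def get_anti_nodes_p2(antennas, antenna, width, height):
--     # Closed-form version: for each pair, the in-grid points on the antenna line form a
--     # contiguous parameter interval [lo, hi]; compute it by ceil/floor interval arithmetic
--     # and emit the reachable part directly instead of stepping point by point.
--     anti_nodes = set()
--     locations = antennas[antenna]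
--     n = len(locations)
--     for i in range(n - 1):
--         for j in range(i + 1, n):
--             x1, y1 = locations[i]
--             x2, y2 = locations[j]
--             dx, dy = x2 - x1, y2 - y1
--             lo, hi, feasible = None, None, True
--             for c, d, dim in ((x1, dx, width), (y1, dy, height)):
--                 if d == 0:
--                     if not (0 <= c < dim):
--                         feasible = False
--                 else:
--                     if d > 0:
--                         l, h = -((c) // d), (dim - 1 - c) // d
--                     else:
--                         l, h = -((dim - 1 - c) // -d), c // -d
--                     lo = l if lo is None else max(lo, l)
--                     hi = h if hi is None else min(hi, h)
--             if not feasible: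
--                 continue
--             if lo is None:          # dx == dy == 0 and the point is in the grid
--                 lo, hi = 0, 0
--             # forward reach from the antenna (t = 0, 1, ...), then backward (t = -1, -2, ...)
--             fwd_hi = hi if lo <= 0 else -1
--             for t in range(0, fwd_hi + 1):
--                 anti_nodes.add((x1 + t * dx, y1 + t * dy))
--             bwd_lo = lo if hi >= -1 else 0
--             for t in range(-1, bwd_lo - 1, -1):
--                 anti_nodes.add((x1 + t * dx, y1 + t * dy))
--     return anti_nodes
-- ===== Notes on version B (the rewrite author's own statement) =====
-- stated objective: faster
-- what changed: Replaces A's two step-until-out-of-grid while-loops per antenna pair by a closed-form ceil/floor computation of the interval of line parameters whose points lie in the grid, emitting the reachable range directly.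
import Mathlib
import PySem

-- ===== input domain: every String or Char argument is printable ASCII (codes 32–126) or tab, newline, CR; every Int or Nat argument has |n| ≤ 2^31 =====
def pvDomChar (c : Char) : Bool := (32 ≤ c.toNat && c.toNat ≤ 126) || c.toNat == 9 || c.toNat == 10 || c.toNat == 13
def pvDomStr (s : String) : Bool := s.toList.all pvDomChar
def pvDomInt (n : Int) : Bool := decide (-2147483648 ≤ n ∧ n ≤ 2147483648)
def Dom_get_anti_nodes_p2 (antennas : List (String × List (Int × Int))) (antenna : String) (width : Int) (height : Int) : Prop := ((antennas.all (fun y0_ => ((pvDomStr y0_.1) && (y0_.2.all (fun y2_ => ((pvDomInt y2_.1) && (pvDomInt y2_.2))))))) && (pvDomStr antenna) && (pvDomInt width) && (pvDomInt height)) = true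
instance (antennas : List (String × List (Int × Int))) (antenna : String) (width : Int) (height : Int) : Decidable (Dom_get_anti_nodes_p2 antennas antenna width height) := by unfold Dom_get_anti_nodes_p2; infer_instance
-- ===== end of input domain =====

-- B replaces A's step-until-out-of-grid while-loops by a closed-form ceil/floor interval
-- [lo, hi] of line parameters whose points are in the grid, and emits that reachable range
-- directly (alternative algorithm; same return value).

-- ===== PORT A =====
def in_grid (point : Int × Int) (width : Int) (height : Int) : Bool :=
  decide (0 ≤ point.1 ∧ point.1 < width ∧ 0 ≤ point.2 ∧ point.2 < height)

-- fuel for the two while-loops: with (dx,dy) ≠ (0,0) an in-grid walk takes < width+height steps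
def pvFuel (width height : Int) : Nat := width.toNat + height.toNat + 2

-- 'while in_grid((ax,ay),w,h): add; step' — fuel only makes the recursion total; it is never
-- exhausted on inputs admitted by Pre_ (proved via pvWalk_in below)
def pvWalkA (fuel : Nat) (ax ay dx dy width height : Int) (acc : PySem.Set (Int × Int)) :
    PySem.Set (Int × Int) :=
  match fuel with
  | 0 => acc
  | f + 1 =>
    if in_grid (ax, ay) width height then
      pvWalkA f (ax + dx) (ay + dy) dx dy width height (PySem.Set.add acc (ax, ay))
    else acc

-- body of A's inner pair loop
def pvPairA (x1 y1 x2 y2 width height : Int) (acc : PySem.Set (Int × Int)) :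
    PySem.Set (Int × Int) :=
  let dx := x2 - x1
  let dy := y2 - y1
  let acc1 := pvWalkA (pvFuel width height) x1 y1 dx dy width height acc
  pvWalkA (pvFuel width height) (x1 - dx) (y1 - dy) (-dx) (-dy) width height acc1

def get_anti_nodes_p2 (antennas : List (String × List (Int × Int))) (antenna : String) (width : Int) (height : Int) : List (Int × Int) :=
  let locs := ((antennas.lookup antenna).getD [])   -- KeyError excluded by Pre_
  (PySem.List.pyRange 0 ((locs.length : Int) - 1) 1).foldl (fun acc i =>
    (PySem.List.pyRange (i + 1) (locs.length : Int) 1).foldl (fun acc j =>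
      let p1 := PySem.List.pyGetD locs i ((0 : Int), (0 : Int))
      let p2 := PySem.List.pyGetD locs j ((0 : Int), (0 : Int))
      pvPairA p1.1 p1.2 p2.1 p2.2 width height acc) acc) PySem.Set.empty

-- ===== PORT B =====
-- one step of Source B's axis loop: state (lo, hi, feasible)
def pvAxisStep (st : Option Int × Option Int × Bool) (a : Int × Int × Int) :
    Option Int × Option Int × Bool :=
  let c := a.1; let d := a.2.1; let dim := a.2.2
  if d = 0 then
    if ¬ (0 ≤ c ∧ c < dim) then (st.1, st.2.1, false) else st
  else
    let lh : Int × Int :=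
      if d > 0 then (-(PySem.Int.floordiv c d), PySem.Int.floordiv (dim - 1 - c) d)
      else (-(PySem.Int.floordiv (dim - 1 - c) (-d)), PySem.Int.floordiv c (-d))
    (some (match st.1 with | none => lh.1 | some v => max v lh.1),
     some (match st.2.1 with | none => lh.2 | some v => min v lh.2), st.2.2)

-- body of Source B's inner pair loop
def pvPairB (x1 y1 x2 y2 width height : Int) (acc : PySem.Set (Int × Int)) :
    PySem.Set (Int × Int) :=
  let dx := x2 - x1
  let dy := y2 - y1
  let st := [(x1, dx, width), (y1, dy, height)].foldl pvAxisStep (none, none, true)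
  if st.2.2 then
    let lh : Int × Int := match st.1, st.2.1 with
      | some l, some hh => (l, hh)
      | _, _ => (0, 0)          -- lo is None: dx == dy == 0 with the point in the grid
    let fwdHi := if lh.1 ≤ 0 then lh.2 else -1
    let acc1 := (PySem.List.pyRange 0 (fwdHi + 1) 1).foldl
      (fun s t => PySem.Set.add s (x1 + t * dx, y1 + t * dy)) acc
    let bwdLo := if lh.2 ≥ -1 then lh.1 else 0
    (PySem.List.pyRange (-1) (bwdLo - 1) (-1)).foldl
      (fun s t => PySem.Set.add s (x1 + t * dx, y1 + t * dy)) acc1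
  else acc

def get_anti_nodes_p2_alt (antennas : List (String × List (Int × Int))) (antenna : String) (width : Int) (height : Int) : List (Int × Int) :=
  let locs := ((antennas.lookup antenna).getD [])
  (PySem.List.pyRange 0 ((locs.length : Int) - 1) 1).foldl (fun acc i =>
    (PySem.List.pyRange (i + 1) (locs.length : Int) 1).foldl (fun acc j =>
      let p1 := PySem.List.pyGetD locs i ((0 : Int), (0 : Int))
      let p2 := PySem.List.pyGetD locs j ((0 : Int), (0 : Int))
      pvPairB p1.1 p1.2 p2.1 p2.2 width height acc) acc) PySem.Set.empty

-- ===== PRECONDITION & SPEC =====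
-- Pre_ excludes exactly the inputs where Python A does not return: a missing antenna key
-- (KeyError) and a repeated in-grid antenna location (A's while-loop then never terminates).
def Pre_get_anti_nodes_p2 (antennas : List (String × List (Int × Int))) (antenna : String) (width : Int) (height : Int) : Prop :=
  (antennas.lookup antenna).isSome = true ∧
  List.Pairwise (fun p q : Int × Int => p = q → ¬ (0 ≤ p.1 ∧ p.1 < width ∧ 0 ≤ p.2 ∧ p.2 < height))
    (((antennas.lookup antenna).getD []))
instance (antennas : List (String × List (Int × Int))) (antenna : String) (width : Int) (height : Int) : Decidable (Pre_get_anti_nodes_p2 antennas antenna width height) := by unfold Pre_get_anti_nodes_p2; infer_instance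

def pvWitness_get_anti_nodes_p2 : (List (String × List (Int × Int))) × String × Int × Int :=
  ([("a", [(0, 0), (1, 1), (2, 0)])], "a", 4, 4)

def Spec_get_anti_nodes_p2 (antennas : List (String × List (Int × Int))) (antenna : String) (width : Int) (height : Int) (out : List (Int × Int)) : Prop := out = get_anti_nodes_p2_alt antennas antenna width height
instance (antennas : List (String × List (Int × Int))) (antenna : String) (width : Int) (height : Int) (out : List (Int × Int)) : Decidable (Spec_get_anti_nodes_p2 antennas antenna width height out) := by unfold Spec_get_anti_nodes_p2; infer_instance

-- ===== CLAIM (what is proved, stated in full; the proofs are below) =====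
def Claim_equal_get_anti_nodes_p2 : Prop := ∀ (antennas : List (String × List (Int × Int))) (antenna : String) (width : Int) (height : Int), Dom_get_anti_nodes_p2 antennas antenna width height → Pre_get_anti_nodes_p2 antennas antenna width height → Spec_get_anti_nodes_p2 antennas antenna width height (get_anti_nodes_p2 antennas antenna width height)

-- ===== LEMMAS AND PROOFS =====

theorem pv_walk_stop (fuel : Nat) (ax ay dx dy w h : Int) (acc : PySem.Set (Int × Int))
    (hg : in_grid (ax, ay) w h = false) : pvWalkA fuel ax ay dx dy w h acc = acc := by
  cases fuel <;> simp [pvWalkA, hg]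

-- the in-grid condition along one axis, as a closed interval of line parameters
theorem pv_axis_iff (c d dim t : Int) (hd : d ≠ 0) :
    (0 ≤ c + t * d ∧ c + t * d < dim) ↔
      ((if d > 0 then -(PySem.Int.floordiv c d) else -(PySem.Int.floordiv (dim - 1 - c) (-d))) ≤ t ∧
       t ≤ (if d > 0 then PySem.Int.floordiv (dim - 1 - c) d else PySem.Int.floordiv c (-d))) := by
  rcases lt_or_gt_of_ne hd with hneg | hpos
  · have hnp : ¬ d > 0 := by omega
    have hp : (0:Int) < -d := by omega
    simp only [if_neg hnp]
    have h1 : t ≤ PySem.Int.floordiv c (-d) ↔ t * (-d) ≤ c :=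
      PySem.Int.le_floordiv_iff_mul_le hp
    have h2 : -t ≤ PySem.Int.floordiv (dim - 1 - c) (-d) ↔ (-t) * (-d) ≤ dim - 1 - c :=
      PySem.Int.le_floordiv_iff_mul_le hp
    rw [neg_le, h2, h1]
    have e1 : (-t) * (-d) = t * d := by ring
    have e2 : t * (-d) = -(t * d) := by ring
    rw [e1, e2]
    generalize t * d = m
    omega
  · simp only [if_pos hpos]
    have h1 : t ≤ PySem.Int.floordiv (dim - 1 - c) d ↔ t * d ≤ dim - 1 - c :=
      PySem.Int.le_floordiv_iff_mul_le hpos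
    have h2 : -t ≤ PySem.Int.floordiv c d ↔ (-t) * d ≤ c :=
      PySem.Int.le_floordiv_iff_mul_le hpos
    rw [neg_le, h2, h1]
    have e1 : (-t) * d = -(t * d) := by ring
    rw [e1]
    generalize t * d = m
    omega

theorem pv_reach_bound (x0 d w a b : Int) (hd : d ≠ 0) (hab : a ≤ b)
    (h1 : 0 ≤ x0 + a * d) (h2 : x0 + a * d < w)
    (h3 : 0 ≤ x0 + b * d) (h4 : x0 + b * d < w) : b - a < w := by
  rcases lt_or_gt_of_ne hd with hneg | hpos
  · have h5 : (b - a) * 1 ≤ (b - a) * (-d) :=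
      mul_le_mul_of_nonneg_left (by omega) (by omega)
    have e1 : (b - a) * (-d) = a * d - b * d := by ring
    have e2 : (b - a) * 1 = b - a := by ring
    rw [e1, e2] at h5
    generalize ha : a * d = P at h1 h2 h5
    generalize hb : b * d = Q at h3 h4 h5
    omega
  · have h5 : (b - a) * 1 ≤ (b - a) * d :=
      mul_le_mul_of_nonneg_left (by omega) (by omega)
    have e1 : (b - a) * d = b * d - a * d := by ring
    have e2 : (b - a) * 1 = b - a := by ring
    rw [e1, e2] at h5
    generalize ha : a * d = P at h1 h2 h5
    generalize hb : b * d = Q at h3 h4 h5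
    omega

theorem pv_walk_out (x1 y1 dx dy w h lo hi : Int)
    (H : ∀ t : Int, in_grid (x1 + t * dx, y1 + t * dy) w h = decide (lo ≤ t ∧ t ≤ hi))
    (fuel : Nat) (t0 : Int) (acc : PySem.Set (Int × Int)) (hout : ¬ (lo ≤ t0 ∧ t0 ≤ hi)) :
    pvWalkA fuel (x1 + t0 * dx) (y1 + t0 * dy) dx dy w h acc = acc := by
  have hg : in_grid (x1 + t0 * dx, y1 + t0 * dy) w h = false := by
    rw [H t0]; simpa using hout
  exact pv_walk_stop _ _ _ _ _ _ _ _ hg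

theorem pv_walk_in (x1 y1 dx dy w h lo hi : Int)
    (H : ∀ t : Int, in_grid (x1 + t * dx, y1 + t * dy) w h = decide (lo ≤ t ∧ t ≤ hi)) :
    ∀ (fuel : Nat) (t0 : Int) (acc : PySem.Set (Int × Int)), lo ≤ t0 → hi < t0 + (fuel : Int) →
    pvWalkA fuel (x1 + t0 * dx) (y1 + t0 * dy) dx dy w h acc =
      (PySem.List.pyRange t0 (hi + 1) 1).foldl
        (fun s t => PySem.Set.add s (x1 + t * dx, y1 + t * dy)) acc := by
  intro fuel
  induction fuel with
  | zero =>
    intro t0 acc hlo hfe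
    rw [PySem.List.pyRange_one_eq_nil (by simpa using hfe : hi + 1 ≤ t0)]
    simp [pvWalkA]
  | succ f ih =>
    intro t0 acc hlo hfe
    by_cases hle : t0 ≤ hi
    · have hg : in_grid (x1 + t0 * dx, y1 + t0 * dy) w h = true := by
        rw [H t0]; simp only [decide_eq_true_eq]; exact ⟨hlo, hle⟩
      rw [pvWalkA, if_pos (by simpa using hg)]
      rw [PySem.List.pyRange_one_cons (by omega : t0 < hi + 1), List.foldl_cons]
      have e1 : x1 + t0 * dx + dx = x1 + (t0 + 1) * dx := by ring
      have e2 : y1 + t0 * dy + dy = y1 + (t0 + 1) * dy := by ring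
      rw [e1, e2]
      exact ih (t0 + 1) _ (by omega) (by push_cast at hfe ⊢; omega)
    · have hg : in_grid (x1 + t0 * dx, y1 + t0 * dy) w h = false := by
        rw [H t0]; simp only [decide_eq_false_iff_not]; omega
      rw [pv_walk_stop _ _ _ _ _ _ _ _ hg,
        PySem.List.pyRange_one_eq_nil (by omega : hi + 1 ≤ t0)]
      rfl

-- both while-loops of one pair, against B's two closed-form ranges
theorem pv_tail_eq (x1 y1 dx dy w h lo hi : Int) (hd : dx ≠ 0 ∨ dy ≠ 0)
    (H : ∀ t : Int, in_grid (x1 + t * dx, y1 + t * dy) w h = decide (lo ≤ t ∧ t ≤ hi))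
    (acc : PySem.Set (Int × Int)) :
    pvWalkA (pvFuel w h) (x1 - dx) (y1 - dy) (-dx) (-dy) w h
      (pvWalkA (pvFuel w h) x1 y1 dx dy w h acc) =
    (PySem.List.pyRange (-1) ((if hi ≥ -1 then lo else 0) - 1) (-1)).foldl
      (fun s t => PySem.Set.add s (x1 + t * dx, y1 + t * dy))
      ((PySem.List.pyRange 0 ((if lo ≤ 0 then hi else -1) + 1) 1).foldl
        (fun s t => PySem.Set.add s (x1 + t * dx, y1 + t * dy)) acc) := by
  have hfuel2 : (2 : Int) ≤ (pvFuel w h : Int) := by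
    unfold pvFuel; push_cast; omega
  -- forward loop
  have hfwd : pvWalkA (pvFuel w h) x1 y1 dx dy w h acc =
      (PySem.List.pyRange 0 ((if lo ≤ 0 then hi else -1) + 1) 1).foldl
        (fun s t => PySem.Set.add s (x1 + t * dx, y1 + t * dy)) acc := by
    have e0 : x1 = x1 + 0 * dx := by ring
    have e0' : y1 = y1 + 0 * dy := by ring
    by_cases hlo0 : lo ≤ 0
    · rw [if_pos hlo0]
      have hbound : hi < 0 + (pvFuel w h : Int) := by
        by_cases hhi0 : hi < 0
        · omega
        · have hg : in_grid (x1 + 0 * dx, y1 + 0 * dy) w h = true := by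
            rw [H 0]; simp only [decide_eq_true_eq]; omega
          have hg' : in_grid (x1 + hi * dx, y1 + hi * dy) w h = true := by
            rw [H hi]; simp only [decide_eq_true_eq]; omega
          simp only [in_grid, decide_eq_true_eq] at hg hg'
          have hw0 : 0 < w := by omega
          have hh0 : 0 < h := by omega
          have hwn : ((w.toNat : Int)) = w := Int.toNat_of_nonneg (by omega)
          have hhn : ((h.toNat : Int)) = h := Int.toNat_of_nonneg (by omega)
          rcases hd with hdx | hdy
          · have := pv_reach_bound x1 dx w 0 hi hdx (by omega) hg.1 hg.2.1 hg'.1 hg'.2.1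
            unfold pvFuel; push_cast; omega
          · have := pv_reach_bound y1 dy h 0 hi hdy (by omega) hg.2.2.1 hg.2.2.2 hg'.2.2.1 hg'.2.2.2
            unfold pvFuel; push_cast; omega
      calc pvWalkA (pvFuel w h) x1 y1 dx dy w h acc
          = pvWalkA (pvFuel w h) (x1 + 0 * dx) (y1 + 0 * dy) dx dy w h acc := by rw [← e0, ← e0']
        _ = _ := pv_walk_in x1 y1 dx dy w h lo hi H (pvFuel w h) 0 acc hlo0 hbound
    · rw [if_neg hlo0, PySem.List.pyRange_one_eq_nil (by omega : (-1:Int) + 1 ≤ 0), List.foldl_nil]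
      calc pvWalkA (pvFuel w h) x1 y1 dx dy w h acc
          = pvWalkA (pvFuel w h) (x1 + 0 * dx) (y1 + 0 * dy) dx dy w h acc := by rw [← e0, ← e0']
        _ = acc := pv_walk_out x1 y1 dx dy w h lo hi H _ 0 acc (by omega)
  rw [hfwd]
  set acc1 := (PySem.List.pyRange 0 ((if lo ≤ 0 then hi else -1) + 1) 1).foldl
    (fun s t => PySem.Set.add s (x1 + t * dx, y1 + t * dy)) acc with hacc1
  -- backward loop: substitute t = -1 - s
  have H' : ∀ s : Int, in_grid ((x1 - dx) + s * (-dx), (y1 - dy) + s * (-dy)) w h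
      = decide ((-1 - hi) ≤ s ∧ s ≤ (-1 - lo)) := by
    intro s
    have e1 : (x1 - dx) + s * (-dx) = x1 + (-1 - s) * dx := by ring
    have e2 : (y1 - dy) + s * (-dy) = y1 + (-1 - s) * dy := by ring
    rw [e1, e2, H (-1 - s)]
    exact decide_eq_decide.mpr (by omega)
  have e0 : x1 - dx = (x1 - dx) + 0 * (-dx) := by ring
  have e0' : y1 - dy = (y1 - dy) + 0 * (-dy) := by ring
  by_cases hbk : hi ≥ -1
  · rw [if_pos hbk]
    by_cases hlo1 : lo ≤ -1
    · have hbound : -1 - lo < 0 + (pvFuel w h : Int) := by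
        by_cases htriv : -1 - lo < 0
        · omega
        · have hg : in_grid (x1 + (-1) * dx, y1 + (-1) * dy) w h = true := by
            rw [H (-1)]; simp only [decide_eq_true_eq]; omega
          have hg' : in_grid (x1 + lo * dx, y1 + lo * dy) w h = true := by
            rw [H lo]; simp only [decide_eq_true_eq]; omega
          simp only [in_grid, decide_eq_true_eq] at hg hg'
          rcases hd with hdx | hdy
          · have := pv_reach_bound x1 dx w lo (-1) hdx (by omega) hg'.1 hg'.2.1 hg.1 hg.2.1
            unfold pvFuel; push_cast; omega
          · have := pv_reach_bound y1 dy h lo (-1) hdy (by omega) hg'.2.2.1 hg'.2.2.2 hg.2.2.1 hg.2.2.2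
            unfold pvFuel; push_cast; omega
      have hw := pv_walk_in (x1 - dx) (y1 - dy) (-dx) (-dy) w h (-1 - hi) (-1 - lo) H'
        (pvFuel w h) 0 acc1 (by omega) hbound
      calc pvWalkA (pvFuel w h) (x1 - dx) (y1 - dy) (-dx) (-dy) w h acc1
          = pvWalkA (pvFuel w h) ((x1 - dx) + 0 * (-dx)) ((y1 - dy) + 0 * (-dy)) (-dx) (-dy) w h acc1 := by
            rw [← e0, ← e0']
        _ = (PySem.List.pyRange 0 ((-1 - lo) + 1) 1).foldl
              (fun s t => PySem.Set.add s ((x1 - dx) + t * (-dx), (y1 - dy) + t * (-dy))) acc1 := hw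
        _ = (PySem.List.pyRange (-1) (lo - 1) (-1)).foldl
              (fun s t => PySem.Set.add s (x1 + t * dx, y1 + t * dy)) acc1 := by
            rw [PySem.List.pyRange_one, PySem.List.pyRange_neg_one]
            have hlen : ((-1 - lo) + 1 - 0).toNat = ((-1 : Int) - (lo - 1)).toNat := by omega
            rw [hlen, List.foldl_map, List.foldl_map]
            apply PySem.List.foldl_congr_mem
            intro a k _
            have ex : (x1 - dx) + (0 + (k : Int)) * (-dx) = x1 + (-1 - (k : Int)) * dx := by ring
            have ey : (y1 - dy) + (0 + (k : Int)) * (-dy) = y1 + (-1 - (k : Int)) * dy := by ring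
            rw [ex, ey]
    · -- interval within {…, -2}? no: lo ≥ 0 and hi ≥ -1: backward starts at -1 which is < lo,
      -- so the walk stops immediately and B's range [-1, lo-1) downward is empty too... 
      have hA : pvWalkA (pvFuel w h) (x1 - dx) (y1 - dy) (-dx) (-dy) w h acc1 = acc1 := by
        calc pvWalkA (pvFuel w h) (x1 - dx) (y1 - dy) (-dx) (-dy) w h acc1
            = pvWalkA (pvFuel w h) ((x1 - dx) + 0 * (-dx)) ((y1 - dy) + 0 * (-dy)) (-dx) (-dy) w h acc1 := by
              rw [← e0, ← e0']
          _ = acc1 := pv_walk_out _ _ _ _ _ _ _ _ H' _ 0 acc1 (by omega)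
      rw [hA, PySem.List.pyRange_neg_one]
      have : ((-1 : Int) - (lo - 1)).toNat = 0 := by omega
      rw [this]
      rfl
  · rw [if_neg hbk]
    have hA : pvWalkA (pvFuel w h) (x1 - dx) (y1 - dy) (-dx) (-dy) w h acc1 = acc1 := by
      calc pvWalkA (pvFuel w h) (x1 - dx) (y1 - dy) (-dx) (-dy) w h acc1
          = pvWalkA (pvFuel w h) ((x1 - dx) + 0 * (-dx)) ((y1 - dy) + 0 * (-dy)) (-dx) (-dy) w h acc1 := by
            rw [← e0, ← e0']
        _ = acc1 := pv_walk_out _ _ _ _ _ _ _ _ H' _ 0 acc1 (by omega)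
    rw [hA, PySem.List.pyRange_neg_one]
    have : ((-1 : Int) - ((0:Int) - 1)).toNat = 0 := by omega
    rw [this]
    rfl

-- A's pair body equals B's pair body whenever the pair cannot make A's loop diverge
theorem pv_pair_eq (x1 y1 x2 y2 w h : Int)
    (hne : x1 = x2 ∧ y1 = y2 → ¬ (0 ≤ x1 ∧ x1 < w ∧ 0 ≤ y1 ∧ y1 < h))
    (acc : PySem.Set (Int × Int)) :
    pvPairA x1 y1 x2 y2 w h acc = pvPairB x1 y1 x2 y2 w h acc := by
  unfold pvPairA pvPairB
  dsimp only
  by_cases hdx : x2 - x1 = 0 <;> by_cases hdy : y2 - y1 = 0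
  · -- dx = dy = 0: the pair is a repeated point, necessarily out of the grid
    rw [hdx, hdy]
    have hout : ¬ (0 ≤ x1 ∧ x1 < w ∧ 0 ≤ y1 ∧ y1 < h) := hne ⟨by omega, by omega⟩
    have hg : in_grid (x1, y1) w h = false := by
      simp only [in_grid, decide_eq_false_iff_not]; exact hout
    have hst : (List.foldl pvAxisStep ((none : Option Int), (none : Option Int), true)
        [(x1, (0:Int), w), (y1, (0:Int), h)]).2.2 = false := by
      by_cases hPx : 0 ≤ x1 ∧ x1 < w
      · have hPy : ¬ (0 ≤ y1 ∧ y1 < h) := by tauto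
        simp [pvAxisStep, hPx, hPy]
      · simp [pvAxisStep, hPx]
    rw [hst]
    simp only [Bool.false_eq_true, if_false]
    rw [pv_walk_stop _ _ _ _ _ _ _ _ hg, sub_zero, sub_zero]
    exact pv_walk_stop _ _ _ _ _ _ _ _ hg
  · -- dx = 0, dy ≠ 0: vertical line
    rw [hdx]
    by_cases hPx : 0 ≤ x1 ∧ x1 < w
    · have hst : List.foldl pvAxisStep ((none : Option Int), (none : Option Int), true)
          [(x1, (0:Int), w), (y1, y2 - y1, h)]
          = (some (if y2 - y1 > 0 then -(PySem.Int.floordiv y1 (y2 - y1))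
                   else -(PySem.Int.floordiv (h - 1 - y1) (-(y2 - y1)))),
             some (if y2 - y1 > 0 then PySem.Int.floordiv (h - 1 - y1) (y2 - y1)
                   else PySem.Int.floordiv y1 (-(y2 - y1))),
             true) := by
        simp [pvAxisStep, hdy, hPx, apply_ite]
      rw [hst]
      refine pv_tail_eq x1 y1 0 (y2 - y1) w h _ _ (Or.inr hdy) ?_ acc
      intro t
      have ex : x1 + t * 0 = x1 := by ring
      rw [ex]
      simp only [in_grid]
      apply decide_eq_decide.mpr
      have hax := pv_axis_iff y1 (y2 - y1) h t hdy
      constructor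
      · rintro ⟨_, _, hc, hd2⟩
        exact hax.mp ⟨hc, hd2⟩
      · intro hlh
        have hy := hax.mpr hlh
        exact ⟨hPx.1, hPx.2, hy.1, hy.2⟩
    · have hst : (List.foldl pvAxisStep ((none : Option Int), (none : Option Int), true)
          [(x1, (0:Int), w), (y1, y2 - y1, h)]).2.2 = false := by
        simp [pvAxisStep, hdy, hPx]
      rw [hst]
      simp only [Bool.false_eq_true, if_false]
      have hg : ∀ yy : Int, in_grid (x1, yy) w h = false := fun yy => by
        simp only [in_grid, decide_eq_false_iff_not]; tauto
      rw [pv_walk_stop _ _ _ _ _ _ _ _ (hg y1), sub_zero]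
      exact pv_walk_stop _ _ _ _ _ _ _ _ (hg _)
  · -- dx ≠ 0, dy = 0: horizontal line
    rw [hdy]
    by_cases hPy : 0 ≤ y1 ∧ y1 < h
    · have hst : List.foldl pvAxisStep ((none : Option Int), (none : Option Int), true)
          [(x1, x2 - x1, w), (y1, (0:Int), h)]
          = (some (if x2 - x1 > 0 then -(PySem.Int.floordiv x1 (x2 - x1))
                   else -(PySem.Int.floordiv (w - 1 - x1) (-(x2 - x1)))),
             some (if x2 - x1 > 0 then PySem.Int.floordiv (w - 1 - x1) (x2 - x1)
                   else PySem.Int.floordiv x1 (-(x2 - x1))),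
             true) := by
        simp [pvAxisStep, hdx, hPy, apply_ite]
      rw [hst]
      refine pv_tail_eq x1 y1 (x2 - x1) 0 w h _ _ (Or.inl hdx) ?_ acc
      intro t
      have ey : y1 + t * 0 = y1 := by ring
      rw [ey]
      simp only [in_grid]
      apply decide_eq_decide.mpr
      have hax := pv_axis_iff x1 (x2 - x1) w t hdx
      constructor
      · rintro ⟨ha, hb, _, _⟩
        exact hax.mp ⟨ha, hb⟩
      · intro hlh
        have hx := hax.mpr hlh
        exact ⟨hx.1, hx.2, hPy.1, hPy.2⟩
    · have hst : (List.foldl pvAxisStep ((none : Option Int), (none : Option Int), true)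
          [(x1, x2 - x1, w), (y1, (0:Int), h)]).2.2 = false := by
        simp [pvAxisStep, hdx, hPy]
      rw [hst]
      simp only [Bool.false_eq_true, if_false]
      have hg : ∀ xx : Int, in_grid (xx, y1) w h = false := fun xx => by
        simp only [in_grid, decide_eq_false_iff_not]; tauto
      rw [pv_walk_stop _ _ _ _ _ _ _ _ (hg x1), sub_zero]
      exact pv_walk_stop _ _ _ _ _ _ _ _ (hg _)
  · -- dx ≠ 0, dy ≠ 0
    have hst : List.foldl pvAxisStep ((none : Option Int), (none : Option Int), true)
        [(x1, x2 - x1, w), (y1, y2 - y1, h)]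
        = (some (max (if x2 - x1 > 0 then -(PySem.Int.floordiv x1 (x2 - x1))
                      else -(PySem.Int.floordiv (w - 1 - x1) (-(x2 - x1))))
                     (if y2 - y1 > 0 then -(PySem.Int.floordiv y1 (y2 - y1))
                      else -(PySem.Int.floordiv (h - 1 - y1) (-(y2 - y1))))),
           some (min (if x2 - x1 > 0 then PySem.Int.floordiv (w - 1 - x1) (x2 - x1)
                      else PySem.Int.floordiv x1 (-(x2 - x1)))
                     (if y2 - y1 > 0 then PySem.Int.floordiv (h - 1 - y1) (y2 - y1)
                      else PySem.Int.floordiv y1 (-(y2 - y1)))),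
           true) := by
      by_cases hx : x1 < x2 <;> by_cases hy : y1 < y2 <;>
        simp [pvAxisStep, hdx, hdy, hx, hy]
    rw [hst]
    refine pv_tail_eq x1 y1 (x2 - x1) (y2 - y1) w h _ _ (Or.inl hdx) ?_ acc
    intro t
    simp only [in_grid]
    apply decide_eq_decide.mpr
    have haxx := pv_axis_iff x1 (x2 - x1) w t hdx
    have haxy := pv_axis_iff y1 (y2 - y1) h t hdy
    rw [max_le_iff, le_min_iff]
    constructor
    · rintro ⟨ha, hb, hc, hd2⟩
      have h1 := haxx.mp ⟨ha, hb⟩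
      have h2 := haxy.mp ⟨hc, hd2⟩
      exact ⟨⟨h1.1, h2.1⟩, h1.2, h2.2⟩
    · rintro ⟨⟨l1, l2⟩, u1, u2⟩
      have h1 := haxx.mpr ⟨l1, u1⟩
      have h2 := haxy.mpr ⟨l2, u2⟩
      exact ⟨h1.1, h1.2, h2.1, h2.2⟩

-- ===== VERDICT (by name: the statement is the Claim_ definition above) =====
theorem get_anti_nodes_p2_spec : Claim_equal_get_anti_nodes_p2 := by
  intro antennas antenna width height _hdom hpre
  unfold Spec_get_anti_nodes_p2
  unfold get_anti_nodes_p2 get_anti_nodes_p2_alt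
  obtain ⟨-, hpw⟩ := hpre
  set locs := ((antennas.lookup antenna).getD []) with hlocs
  apply PySem.List.foldl_congr_mem
  intro acc i hi
  apply PySem.List.foldl_congr_mem
  intro acc' j hj
  rw [PySem.List.mem_pyRange_one] at hi hj
  have hi0 : 0 ≤ i := hi.1
  have hj0 : 0 ≤ j := le_trans (by omega) hj.1
  have hilt : i.toNat < locs.length := by omega
  have hjlt : j.toNat < locs.length := by omega
  have hij : i.toNat < j.toNat := by omega
  have hp1 : PySem.List.pyGetD locs i ((0:Int),(0:Int)) = locs[i.toNat] := by
    rw [PySem.List.pyGetD_of_nonneg _ _ hi0, List.getD_eq_getElem _ _ hilt]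
  have hp2 : PySem.List.pyGetD locs j ((0:Int),(0:Int)) = locs[j.toNat] := by
    rw [PySem.List.pyGetD_of_nonneg _ _ hj0, List.getD_eq_getElem _ _ hjlt]
  rw [hp1, hp2]
  have hR := (List.pairwise_iff_getElem.mp hpw) i.toNat j.toNat hilt hjlt hij
  apply pv_pair_eq
  intro hxy
  exact hR (by rcases hxy with ⟨hx, hy⟩; exact Prod.ext hx hy)
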